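-- pv_equiv track=rewrite | github.com/GillesArcas/Advent_of_Code | 2017/04.py | code2
-- ===== SOURCE A (Python) =====
-- def code2(liste):
--     n = 0
--     for line in liste:
--         words = line.strip().split()
--         words = tuple(''.join(sorted(word)) for word in words)
--         if len(words) == len(set(words)):
--             n += 1
--     return n
-- ===== SOURCE B (Python) =====
-- def code2(liste):
--     def valid(line):
--         sigs = sorted(''.join(sorted(w)) for w in line.strip().split())
--         return all(a != b for a, b in zip(sigs, sigs[1:]))
--     return sum(1 for line in liste if valid(line))
-- ===== Notes on version B (the rewrite author's own statement) =====
-- stated objective: alternative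
-- what changed: B replaces A's hash-set deduplication test (len(words) == len(set(words))) by sorting each line's canonical signatures and scanning once for an equal adjacent pair, and counts valid lines with a sum-of-generator instead of an accumulator loop.
import Mathlib
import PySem

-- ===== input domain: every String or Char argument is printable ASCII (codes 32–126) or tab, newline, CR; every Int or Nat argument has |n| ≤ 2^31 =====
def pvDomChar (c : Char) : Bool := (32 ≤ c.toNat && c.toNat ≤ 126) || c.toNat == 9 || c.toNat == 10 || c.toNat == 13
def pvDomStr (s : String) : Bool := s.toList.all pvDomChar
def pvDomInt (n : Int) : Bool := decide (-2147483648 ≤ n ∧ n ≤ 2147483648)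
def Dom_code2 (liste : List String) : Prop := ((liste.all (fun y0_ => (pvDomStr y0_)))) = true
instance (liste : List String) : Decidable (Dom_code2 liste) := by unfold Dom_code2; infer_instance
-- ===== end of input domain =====

-- B replaces A's per-line hash-set uniqueness test by sort-then-adjacent-scan over the same
-- canonical word signatures and counts valid lines with a sum-of-generator (alternative algorithm, same cost class).


-- ===== PORT A =====
-- ''.join(sorted(word))  (sorting a string's characters; exact on ASCII domain)
def pvSig (w : String) : String := String.ofList (PySem.List.sorted w.toList (fun c => c) false)

-- len(words) == len(set(words))
def pvLineOkA (line : String) : Bool :=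
  let words := (PySem.Str.split₀ (PySem.Str.strip line)).map pvSig
  words.length == (PySem.Set.ofList words).length

def code2 (liste : List String) : Int :=
  liste.foldl (fun n line => if pvLineOkA line then n + 1 else n) 0

-- ===== PORT B =====
def pvValid (line : String) : Bool :=
  let sigs := PySem.List.sorted ((PySem.Str.split₀ (PySem.Str.strip line)).map pvSig) (fun x => x) false
  (sigs.zip (sigs.drop 1)).all (fun p => p.1 != p.2)

def code2_alt (liste : List String) : Int := (liste.countP pvValid : Int)

-- ===== PRECONDITION & SPEC =====
def Spec_code2 (liste : List String) (out : Int) : Prop := out = code2_alt liste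
instance (liste : List String) (out : Int) : Decidable (Spec_code2 liste out) := by unfold Spec_code2; infer_instance

-- ===== CLAIM (what is proved, stated in full; the proofs are below) =====
def Claim_equal_code2 : Prop := ∀ (liste : List String), Dom_code2 liste → Spec_code2 liste (code2 liste)

-- ===== LEMMAS AND PROOFS =====

-- len(set(xs)) == len(xs) exactly when xs has no duplicates
lemma len_ofList_eq_iff {α : Type} [DecidableEq α] (xs : List α) :
    (PySem.Set.ofList xs).length = xs.length ↔ xs.Nodup := by
  have hperm : (PySem.Set.ofList xs).Perm xs.dedup := by
    apply (List.perm_ext_iff_of_nodup (PySem.Set.nodup_ofList xs) xs.nodup_dedup).2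
    intro a; simp [PySem.Set.mem_ofList, List.mem_dedup]
  rw [hperm.length_eq]
  constructor
  · intro h
    have := List.Sublist.eq_of_length xs.dedup_sublist h
    rw [← this]; exact xs.nodup_dedup
  · intro h; rw [List.dedup_eq_self.2 h]

-- a (≤)-sorted list has no duplicates iff no two adjacent elements are equal
lemma adj_all_ne_iff_nodup {α : Type} [LinearOrder α] [DecidableEq α] :
    ∀ (l : List α), l.Pairwise (· ≤ ·) →
      (((l.zip (l.drop 1)).all (fun p => p.1 != p.2)) = true ↔ l.Nodup) := by
  intro l
  induction l with
  | nil => simp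
  | cons x t ih =>
    intro hp
    cases t with
    | nil => simp
    | cons y t' =>
      have hxy : x ≤ y := (List.pairwise_cons.1 hp).1 y List.mem_cons_self
      have hp' : (y :: t').Pairwise (· ≤ ·) := (List.pairwise_cons.1 hp).2
      constructor
      · intro hall
        simp only [List.drop_succ_cons, List.drop_zero, List.zip_cons_cons, List.all_cons,
          Bool.and_eq_true, bne_iff_ne, ne_eq] at hall
        obtain ⟨hne, hrest⟩ := hall
        have hnd : (y :: t').Nodup := (ih hp').1 (by simpa using hrest)
        refine List.nodup_cons.2 ⟨?_, hnd⟩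
        intro hmem
        rcases List.mem_cons.1 hmem with h | h
        · exact hne h
        · exact hne (le_antisymm hxy ((List.pairwise_cons.1 hp').1 x h))
      · intro hnd
        obtain ⟨hnotmem, hnd'⟩ := List.nodup_cons.1 hnd
        simp only [List.drop_succ_cons, List.drop_zero, List.zip_cons_cons, List.all_cons,
          Bool.and_eq_true, bne_iff_ne, ne_eq]
        refine ⟨fun h => hnotmem (by subst h; exact List.mem_cons_self), ?_⟩
        simpa using (ih hp').2 hnd'

-- per-line agreement: A's set-size test equals B's sorted adjacent-scan test
lemma per_line (line : String) : pvLineOkA line = pvValid line := by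
  rw [Bool.eq_iff_iff]
  simp only [pvLineOkA, pvValid, beq_iff_eq]
  set ws := (PySem.Str.split₀ (PySem.Str.strip line)).map pvSig with hws
  set s := PySem.List.sorted ws (fun x => x) false with hs
  have hpw : s.Pairwise (· ≤ ·) := PySem.List.sorted_pairwise ws (fun x => x)
  have h2 := adj_all_ne_iff_nodup s hpw
  have hperm : s.Perm ws := PySem.List.sorted_perm ws (fun x => x) false
  constructor
  · intro h
    exact h2.2 (hperm.nodup_iff.2 ((len_ofList_eq_iff ws).1 h.symm))
  · intro h
    exact ((len_ofList_eq_iff ws).2 (hperm.nodup_iff.1 (h2.1 h))).symm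

-- ===== VERDICT (by name: the statement is the Claim_ definition above) =====
theorem code2_spec : Claim_equal_code2 := by
  intro liste _
  unfold Spec_code2 code2 code2_alt
  rw [PySem.List.foldl_if_add_one pvLineOkA liste 0, zero_add]
  have h : liste.countP pvLineOkA = liste.countP pvValid :=
    List.countP_congr (fun line _ => by rw [per_line line])
  rw [h]
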